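-- pv_equiv track=rewrite | github.com/daguri9/project-euler | solvers/p026/python/solver.py | rep_len
-- ===== SOURCE A (Python) =====
-- def rep_len(n, m):
--     r = n % m
--     divisors = []
--     reptend = ""
--     length = 0
--     while r not in divisors:
--         if r == 0:
--             return "", 0
--         length += 1
--         divisors.append(r)
--         reptend += str((r * 10) // m)
--         r = (r * 10) % m
--
--     rep_pos = divisors.index(r)
--     reptend = reptend[rep_pos:]
--     length -= rep_pos
--
--     return reptend, length
-- ===== SOURCE B (Python) =====
-- def rep_len(n, m):
--     # Phase 1: walk r -> (r*10)%m recording each remainder's first position in a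
--     # hash map, until we hit 0 (terminating decimal) or a repeated remainder.
--     r = n % m
--     pos = {}
--     while r != 0 and r not in pos:
--         pos[r] = len(pos)
--         r = r * 10 % m
--     if r == 0:
--         return "", 0
--     # Phase 2: the cycle starts at the repeated remainder r; replay it once.
--     length = len(pos) - pos[r]
--     digits = []
--     for _ in range(length):
--         digits.append(str(r * 10 // m))
--         r = r * 10 % m
--     return "".join(digits), length
-- ===== Notes on version B (the rewrite author's own statement) =====
-- stated objective: faster
-- what changed: Replaces the quadratic list scan (O(k) 'r in divisors' membership test and final list.index per step) by a single O(k) pass recording each remainder's first position in a hash map, then replays the cycle once from the first repeated remainder to regenerate exactly the reptend digits.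
import Mathlib
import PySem

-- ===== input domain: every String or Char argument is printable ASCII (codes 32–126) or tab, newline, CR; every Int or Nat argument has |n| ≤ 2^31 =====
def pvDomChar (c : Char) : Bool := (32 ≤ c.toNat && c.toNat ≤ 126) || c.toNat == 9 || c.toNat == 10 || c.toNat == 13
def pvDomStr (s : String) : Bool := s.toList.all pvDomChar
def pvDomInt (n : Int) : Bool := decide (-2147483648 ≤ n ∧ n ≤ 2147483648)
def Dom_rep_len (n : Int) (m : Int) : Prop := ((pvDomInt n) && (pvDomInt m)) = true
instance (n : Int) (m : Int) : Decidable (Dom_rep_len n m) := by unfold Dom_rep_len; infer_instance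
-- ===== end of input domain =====

-- B replaces A's quadratic list-membership scan by a one-pass hash map of remainder
-- positions plus a single replay of the cycle (objective: faster, O(k) vs O(k^2)).

-- ===== PORT A =====
def repLenLoopA (m : Int) : Nat → Int → List Int → String → Int → String × Int
  | 0, _, _, _, _ => ("", 0)
  | fuel+1, r, divisors, reptend, length =>
    if divisors.contains r then
      -- rep_pos = divisors.index(r); reptend[rep_pos:]; length -= rep_pos
      let rep_pos : Int := ((PySem.List.index? divisors r).getD 0 : Nat)
      (PySem.Str.slice reptend (some rep_pos) none, length - rep_pos)
    else if r = 0 then ("", 0)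
    else repLenLoopA m fuel (PySem.Int.mod (r * 10) m) (divisors ++ [r])
        (reptend ++ PySem.Int.toStr (PySem.Int.floordiv (r * 10) m)) (length + 1)

def rep_len (n : Int) (m : Int) : String × Int :=
  repLenLoopA m (m.natAbs + 1) (PySem.Int.mod n m) [] "" 0

-- ===== PORT B =====
-- phase 2 of B: replay `length` digits of the cycle starting at r
def repLenReplay (m : Int) : Nat → Int → List String
  | 0, _ => []
  | k+1, r => PySem.Int.toStr (PySem.Int.floordiv (r * 10) m) :: repLenReplay m k (PySem.Int.mod (r * 10) m)

-- phase 1 of B: record each remainder's first position in a dict until 0 or a repeat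
def repLenLoopB (m : Int) : Nat → Int → PySem.Dict Int Int → String × Int
  | 0, _, _ => ("", 0)
  | fuel+1, r, pos =>
    if r ≠ 0 ∧ pos.contains r = false then
      repLenLoopB m fuel (PySem.Int.mod (r * 10) m) (pos.insert r (pos.items.length : Int))
    else if r = 0 then ("", 0)
    else
      let length : Int := (pos.items.length : Int) - pos.getD r 0
      (PySem.Str.join "" (repLenReplay m length.toNat r), length)

def rep_len_alt (n : Int) (m : Int) : String × Int :=
  repLenLoopB m (m.natAbs + 1) (PySem.Int.mod n m) PySem.Dict.empty

-- ===== PRECONDITION & SPEC =====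
-- Pre_ excludes exactly m = 0, where Python's 'n % m' raises ZeroDivisionError (in A and in B).
def Pre_rep_len (n : Int) (m : Int) : Prop := m ≠ 0
instance (n : Int) (m : Int) : Decidable (Pre_rep_len n m) := by unfold Pre_rep_len; infer_instance
def pvWitness_rep_len : Int × Int := (1, 7)

def Spec_rep_len (n : Int) (m : Int) (out : String × Int) : Prop := out = rep_len_alt n m
instance (n : Int) (m : Int) (out : String × Int) : Decidable (Spec_rep_len n m out) := by unfold Spec_rep_len; infer_instance

-- ===== CLAIM (what is proved, stated in full; the proofs are below) =====
def Claim_equal_rep_len : Prop := ∀ (n : Int) (m : Int), Dom_rep_len n m → Pre_rep_len n m → Spec_rep_len n m (rep_len n m)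

-- ===== LEMMAS AND PROOFS =====

-- the iterated map r ↦ (r*10) % m, and its orbit (the list of the first k iterates)
def rlIter (m : Int) : Nat → Int → Int
  | 0, r => r
  | k+1, r => rlIter m k (PySem.Int.mod (r * 10) m)

def rlOrbit (m : Int) : Nat → Int → List Int
  | 0, _ => []
  | k+1, r => r :: rlOrbit m k (PySem.Int.mod (r * 10) m)

def rlDig (m x : Int) : Int := PySem.Int.floordiv (x * 10) m

def rlChars (m : Int) (l : List Int) : List Char :=
  l.flatMap (fun x => PySem.Int.toChars (rlDig m x))

def rlDict (l : List Int) (k : Nat) : PySem.Dict Int Int :=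
  ⟨(l.zipIdx k).map (fun p => (p.1, (p.2 : Int)))⟩

def rlValid (m x : Int) : Prop := (0 < m ∧ 0 ≤ x ∧ x < m) ∨ (m < 0 ∧ m < x ∧ x ≤ 0)

theorem rlIter_succ (m : Int) (k : Nat) (r : Int) :
    rlIter m (k+1) r = PySem.Int.mod (rlIter m k r * 10) m := by
  induction k generalizing r with
  | zero => rfl
  | succ k ih => simp only [rlIter]; exact ih _

theorem rlOrbit_succ (m : Int) (k : Nat) (r : Int) :
    rlOrbit m (k+1) r = rlOrbit m k r ++ [rlIter m k r] := by
  induction k generalizing r with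
  | zero => rfl
  | succ k ih =>
    have h1 : rlOrbit m (k+1+1) r = r :: rlOrbit m (k+1) (PySem.Int.mod (r * 10) m) := rfl
    rw [h1, ih]; rfl

theorem rlOrbit_length (m : Int) (k : Nat) (r : Int) : (rlOrbit m k r).length = k := by
  induction k generalizing r with
  | zero => rfl
  | succ k ih => simp [rlOrbit, ih]

theorem rlOrbit_append (m : Int) (a b : Nat) (r : Int) :
    rlOrbit m (a+b) r = rlOrbit m a r ++ rlOrbit m b (rlIter m a r) := by
  induction a generalizing r with
  | zero => simp [rlOrbit, rlIter]
  | succ a ih => simp only [Nat.succ_add, rlOrbit, rlIter]; rw [ih]; rfl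

theorem repLenReplay_eq (m : Int) (k : Nat) (r : Int) :
    repLenReplay m k r = (rlOrbit m k r).map (fun x => PySem.Int.toStr (rlDig m x)) := by
  induction k generalizing r with
  | zero => rfl
  | succ k ih => simp [repLenReplay, rlOrbit, ih, rlDig]

theorem rlValid_mod (m a : Int) (hm : m ≠ 0) : rlValid m (PySem.Int.mod a m) := by
  rcases lt_or_gt_of_ne hm with h | h
  · exact Or.inr ⟨h, PySem.Int.mod_neg_bounds a h⟩
  · exact Or.inl ⟨h, PySem.Int.mod_nonneg a h, PySem.Int.mod_lt a h⟩

theorem rlDig_bounds (m x : Int) (hv : rlValid m x) : 0 ≤ rlDig m x ∧ rlDig m x ≤ 9 := by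
  unfold rlDig
  rcases hv with ⟨hm, hx0, hxm⟩ | ⟨hm, hmx, hx0⟩
  · constructor
    · exact (PySem.Int.le_floordiv_iff_mul_le hm).2 (by nlinarith)
    · have : PySem.Int.floordiv (x * 10) m < 10 :=
        (PySem.Int.floordiv_lt_iff_lt_mul hm).2 (by nlinarith)
      omega
  · rw [← PySem.Int.floordiv_neg_neg (x * 10) m]
    have hm' : (0:Int) < -m := by omega
    constructor
    · exact (PySem.Int.le_floordiv_iff_mul_le hm').2 (by nlinarith)
    · have : PySem.Int.floordiv (-(x * 10)) (-m) < 10 :=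
        (PySem.Int.floordiv_lt_iff_lt_mul hm').2 (by nlinarith)
      omega

theorem rlChars_len1 (d : Int) (h0 : 0 ≤ d) (h9 : d ≤ 9) : (PySem.Int.toChars d).length = 1 := by
  interval_cases d <;> decide

theorem rlOrbit_valid (m r : Int) (k : Nat) (hm : m ≠ 0) (hv : rlValid m r) :
    ∀ x ∈ rlOrbit m k r, rlValid m x := by
  induction k generalizing r with
  | zero => simp [rlOrbit]
  | succ k ih =>
    intro x hx
    rcases (by simpa [rlOrbit] using hx) with h | h
    · exact h ▸ hv
    · exact ih _ (rlValid_mod m _ hm) x h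

theorem rlChars_append (m : Int) (l1 l2 : List Int) :
    rlChars m (l1 ++ l2) = rlChars m l1 ++ rlChars m l2 := by
  simp [rlChars]

theorem rlChars_length (m : Int) (l : List Int) (hv : ∀ x ∈ l, rlValid m x) :
    (rlChars m l).length = l.length := by
  induction l with
  | nil => rfl
  | cons a l ih =>
    have hb := rlDig_bounds m a (hv a (by simp))
    have ih' := ih (fun x hx => hv x (by simp [hx]))
    simp only [rlChars, List.flatMap_cons, List.length_append, List.length_cons,
      rlChars_len1 _ hb.1 hb.2] at *
    omega

theorem join_nil_flatten (ps : List (List Char)) : PySem.Chars.join [] ps = ps.flatten := by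
  induction ps with
  | nil => simp [PySem.Chars.join_nil]
  | cons p ps ih =>
    cases ps with
    | nil => simp [PySem.Chars.join_singleton]
    | cons q rest => simp [PySem.Chars.join_cons_cons, ih]

theorem rlDict_contains (l : List Int) (k : Nat) (x : Int) :
    (rlDict l k).contains x = true ↔ x ∈ l := by
  induction l generalizing k with
  | nil => simp [rlDict, PySem.Dict.contains_mk]
  | cons a l ih =>
    have hstep : (rlDict (a :: l) k).contains x = ((a == x) || (rlDict l (k+1)).contains x) := by
      simp only [rlDict, List.zipIdx_cons, List.map_cons, PySem.Dict.contains_mk, List.any_cons]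
    rw [hstep]
    simp only [Bool.or_eq_true, beq_iff_eq, ih (k+1), List.mem_cons]
    tauto

theorem rlDict_getD (l : List Int) (k : Nat) (x : Int) (i : Nat)
    (h : PySem.List.index? l x = some i) : (rlDict l k).getD x 0 = ((k + i : Nat) : Int) := by
  induction l generalizing k i with
  | nil => simp [PySem.List.index?] at h
  | cons a l ih =>
    by_cases hax : a = x
    · subst hax
      rw [PySem.List.index?_cons_self] at h
      obtain rfl : 0 = i := by simpa using h
      simp [rlDict, PySem.Dict.getD, List.zipIdx_cons, PySem.Dict.get?_mk_cons]
    · rw [PySem.List.index?_cons_of_ne _ hax, Option.map_eq_some_iff] at h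
      obtain ⟨j, hj, rfl⟩ := h
      have hrec := ih (k+1) j hj
      have hstep : (rlDict (a :: l) k).getD x 0 = (rlDict l (k+1)).getD x 0 := by
        simp only [rlDict, List.zipIdx_cons, List.map_cons, PySem.Dict.getD,
          PySem.Dict.get?_mk_cons, beq_iff_eq, if_neg hax]
      rw [hstep, hrec]
      push_cast
      ring

theorem rlDict_insert_fresh (l : List Int) (x : Int) (h : x ∉ l) :
    (rlDict l 0).insert x (((rlDict l 0).items.length : Nat) : Int) = rlDict (l ++ [x]) 0 := by
  have hc : (rlDict l 0).contains x = false := by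
    cases hcb : (rlDict l 0).contains x with
    | false => rfl
    | true => exact absurd ((rlDict_contains l 0 x).1 hcb) h
  apply PySem.Dict.ext
  rw [PySem.Dict.insert, if_neg (by simp [hc])]
  simp [rlDict, List.zipIdx_append]

theorem rlDict_size (l : List Int) (k : Nat) : (rlDict l k).items.length = l.length := by
  simp [rlDict]

theorem rlFinish_chars (m r0 : Int) (k i : Nat) (hm : m ≠ 0) (hv : rlValid m r0)
    (hi : PySem.List.index? (rlOrbit m k r0) (rlIter m k r0) = some i) :
    i < k ∧ rlIter m i r0 = rlIter m k r0 ∧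
      (rlChars m (rlOrbit m k r0)).drop i = rlChars m (rlOrbit m (k - i) (rlIter m k r0)) := by
  obtain ⟨hik, hgi, -⟩ := PySem.List.getElem_of_index?_eq_some hi
  have hik' : i < k := by simpa [rlOrbit_length] using hik
  have horb : rlOrbit m k r0 = rlOrbit m i r0 ++ rlOrbit m (k - i) (rlIter m i r0) := by
    rw [← rlOrbit_append]; congr 1; omega
  have hhead : rlOrbit m (k - i) (rlIter m i r0)
      = rlIter m i r0 :: rlOrbit m (k - i - 1) (PySem.Int.mod (rlIter m i r0 * 10) m) := by
    have hki : k - i = (k - i - 1) + 1 := by omega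
    rw [hki]; rfl
  have hiter : rlIter m i r0 = rlIter m k r0 := by
    have hlen : (rlOrbit m i r0).length = i := rlOrbit_length m i r0
    have hgi' : (rlOrbit m k r0)[i]? = some (rlIter m k r0) := by
      rw [List.getElem?_eq_getElem hik, hgi]
    rw [horb, List.getElem?_append_right (by omega), hlen, Nat.sub_self, hhead] at hgi'
    simpa using hgi'
  refine ⟨hik', hiter, ?_⟩
  have hval : ∀ x ∈ rlOrbit m i r0, rlValid m x := by
    intro x hx
    exact rlOrbit_valid m r0 k hm hv x (by rw [horb]; exact List.mem_append_left _ hx)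
  calc (rlChars m (rlOrbit m k r0)).drop i
      = (rlChars m (rlOrbit m i r0) ++ rlChars m (rlOrbit m (k - i) (rlIter m i r0))).drop i := by
        rw [horb, rlChars_append]
    _ = rlChars m (rlOrbit m (k - i) (rlIter m i r0)) := by
        have hcl : (rlChars m (rlOrbit m i r0)).length = i := by
          rw [rlChars_length m _ hval, rlOrbit_length]
        exact List.drop_left' hcl
    _ = rlChars m (rlOrbit m (k - i) (rlIter m k r0)) := by rw [hiter]

theorem rlReplay_chars (m : Int) (j : Nat) (r : Int) :
    (PySem.Str.join "" (repLenReplay m j r)).toList = rlChars m (rlOrbit m j r) := by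
  rw [PySem.Str.toList_join]
  have : (String.toList "") = ([] : List Char) := rfl
  rw [this, join_nil_flatten, repLenReplay_eq, List.map_map]
  simp only [rlChars, List.flatMap_def, Function.comp_def, PySem.Int.toList_toStr]

theorem loop_eq (m r0 : Int) (hm : m ≠ 0) (hv : rlValid m r0) :
    ∀ (fuel : Nat) (k : Nat) (s : String), (0:Int) ∉ rlOrbit m k r0 →
      s.toList = rlChars m (rlOrbit m k r0) →
      repLenLoopA m fuel (rlIter m k r0) (rlOrbit m k r0) s (k : Int)
        = repLenLoopB m fuel (rlIter m k r0) (rlDict (rlOrbit m k r0) 0) := by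
  intro fuel
  induction fuel with
  | zero => intro k s h0 hs; rfl
  | succ fuel ih =>
    intro k s h0 hs
    by_cases hmem : rlIter m k r0 ∈ rlOrbit m k r0
    · -- both sides take the exit branch: A slices, B replays; the values coincide
      have hr0 : rlIter m k r0 ≠ 0 := fun h => h0 (h ▸ hmem)
      have hca : (rlOrbit m k r0).contains (rlIter m k r0) = true := by
        simpa using hmem
      have hcb : (rlDict (rlOrbit m k r0) 0).contains (rlIter m k r0) = true :=
        (rlDict_contains _ 0 _).2 hmem
      obtain ⟨i, hi⟩ : ∃ i, PySem.List.index? (rlOrbit m k r0) (rlIter m k r0) = some i := by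
        have := (PySem.List.index?_isSome_iff (rlOrbit m k r0) (rlIter m k r0)).2 hmem
        exact Option.isSome_iff_exists.mp this
      obtain ⟨hik, hiter, hdrop⟩ := rlFinish_chars m r0 k i hm hv hi
      have hgd : (rlDict (rlOrbit m k r0) 0).getD (rlIter m k r0) 0 = ((i : Nat) : Int) := by
        simpa using rlDict_getD (rlOrbit m k r0) 0 (rlIter m k r0) i hi
      simp only [repLenLoopA, repLenLoopB, hca, if_pos, hi, hcb, hr0,
        Option.getD_some, hgd, rlDict_size, rlOrbit_length]
      rw [if_neg (by simp)]
      have htn : ((k : Int) - (i : Int)).toNat = k - i := by omega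
      refine Prod.ext ?_ (by push_cast; ring)
      show PySem.Str.slice s (some ((i : Nat) : Int)) none
          = PySem.Str.join "" (repLenReplay m ((k : Int) - ((i : Nat) : Int)).toNat (rlIter m k r0))
      rw [← String.toList_inj, PySem.Str.toList_slice]
      simp only [PySem.Chars.slice_eq_listSlice, PySem.List.slice_from_natCast]
      rw [hs, hdrop, htn, rlReplay_chars]
    · -- both sides step: A appends to the list and string, B inserts into the dict
      have hca : (rlOrbit m k r0).contains (rlIter m k r0) = false := by
        simpa using hmem
      by_cases hz : rlIter m k r0 = 0
      · have hca0 : (rlOrbit m k r0).contains 0 = false := hz ▸ hca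
        have h00 : ¬((rlOrbit m k r0).contains 0 = true) := by simpa using (hz ▸ hmem)
        simp only [repLenLoopA, repLenLoopB, hz]
        rw [if_neg h00, if_pos trivial, if_neg (by simp), if_pos trivial]
      · have hcb : (rlDict (rlOrbit m k r0) 0).contains (rlIter m k r0) = false := by
          cases hcb' : (rlDict (rlOrbit m k r0) 0).contains (rlIter m k r0) with
          | false => rfl
          | true => exact absurd ((rlDict_contains _ 0 _).1 hcb') hmem
        simp only [repLenLoopA, repLenLoopB]
        rw [if_neg (by simpa using hmem), if_neg hz, if_pos ⟨hz, hcb⟩]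
        have e1 : rlOrbit m k r0 ++ [rlIter m k r0] = rlOrbit m (k+1) r0 :=
          (rlOrbit_succ m k r0).symm
        have e2 : PySem.Int.mod (rlIter m k r0 * 10) m = rlIter m (k+1) r0 :=
          (rlIter_succ m k r0).symm
        have e3 : (rlDict (rlOrbit m k r0) 0).insert (rlIter m k r0)
              (((rlDict (rlOrbit m k r0) 0).items.length : Nat) : Int)
            = rlDict (rlOrbit m (k+1) r0) 0 := by
          rw [rlDict_insert_fresh _ _ hmem, rlOrbit_succ]
        have h0' : (0:Int) ∉ rlOrbit m (k+1) r0 := by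
          rw [rlOrbit_succ]
          simp only [List.mem_append, List.mem_singleton]
          rintro (h | h)
          · exact h0 h
          · exact hz h.symm
        have hs' : (s ++ PySem.Int.toStr (PySem.Int.floordiv (rlIter m k r0 * 10) m)).toList
            = rlChars m (rlOrbit m (k+1) r0) := by
          rw [String.toList_append, hs, rlOrbit_succ, rlChars_append]
          simp [rlChars, PySem.Int.toList_toStr, rlDig]
        have hk1 : ((k : Int) + 1) = ((k + 1 : Nat) : Int) := by push_cast; ring
        rw [e1, e2, e3, hk1]
        exact ih (k+1) _ h0' hs'

-- ===== VERDICT (by name: the statement is the Claim_ definition above) =====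
theorem rep_len_spec : Claim_equal_rep_len := by
  intro n m _ hpre
  unfold Spec_rep_len rep_len rep_len_alt
  have h := loop_eq m (PySem.Int.mod n m) hpre (rlValid_mod m n hpre)
      (m.natAbs + 1) 0 "" (by simp [rlOrbit]) (by simp [rlOrbit, rlChars])
  simpa [rlIter, rlOrbit, rlDict, PySem.Dict.empty] using h
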